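-- pv_equiv track=rewrite | github.com/Vansh-py/Atomic-Assistant-pc | main4.py | calculate_electron_distribution
-- ===== SOURCE A (Python) =====
-- ELECTRON_DISTRIBUTION = [2, 8, 8, 18, 18, 32, 32]
--
-- def calculate_electron_distribution(num_electrons):
--     distribution = []
--     for electrons_in_orbit in ELECTRON_DISTRIBUTION:
--         if num_electrons > 0:
--             electrons = min(num_electrons, electrons_in_orbit)
--             distribution.append(electrons)
--             num_electrons -= electrons
--         else:
--             break
--     return distribution
-- ===== SOURCE B (Python) =====
-- ELECTRON_DISTRIBUTION = [2, 8, 8, 18, 18, 32, 32]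
--
-- def calculate_electron_distribution(num_electrons):
--     # prefix-sum thresholds: compare the fixed input against cumulative capacities
--     thresholds = []
--     prev = 0
--     for capacity in ELECTRON_DISTRIBUTION:
--         thresholds.append((capacity, prev))
--         prev += capacity
--     distribution = []
--     for capacity, prev_cum in thresholds:
--         if num_electrons <= prev_cum:
--             break
--         distribution.append(min(capacity, num_electrons - prev_cum))
--     return distribution
-- ===== Notes on version B (the rewrite author's own statement) =====
-- stated objective: alternative
-- what changed: B precomputes cumulative-capacity thresholds (a prefix-sum table) and compares the fixed input against each threshold, appending min(capacity, n - prev_cum), instead of A's decremented remaining-electrons counter.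
import Mathlib
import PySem

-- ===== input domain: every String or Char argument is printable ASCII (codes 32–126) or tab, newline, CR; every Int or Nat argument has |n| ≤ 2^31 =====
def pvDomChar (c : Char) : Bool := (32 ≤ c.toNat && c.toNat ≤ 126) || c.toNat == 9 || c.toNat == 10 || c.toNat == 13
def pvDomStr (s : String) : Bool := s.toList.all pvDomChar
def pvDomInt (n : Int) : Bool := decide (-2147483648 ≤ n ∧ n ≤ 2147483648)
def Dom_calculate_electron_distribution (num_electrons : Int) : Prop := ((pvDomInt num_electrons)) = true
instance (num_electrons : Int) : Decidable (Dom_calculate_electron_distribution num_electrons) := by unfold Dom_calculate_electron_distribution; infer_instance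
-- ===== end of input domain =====

-- B replaces A's decremented remaining counter by a precomputed prefix-sum threshold table (alternative decomposition, same cost).


-- ===== PORT A =====
def ELECTRON_DISTRIBUTION : List Int := [2, 8, 8, 18, 18, 32, 32]

-- A's loop: decrement the remaining counter, break when it is no longer positive
def edLoopA : List Int → Int → List Int
  | [], _ => []
  | c :: rest, n =>
      if n > 0 then min n c :: edLoopA rest (n - min n c) else []

def calculate_electron_distribution (num_electrons : Int) : List Int :=
  edLoopA ELECTRON_DISTRIBUTION num_electrons

-- ===== PORT B =====
-- pair each capacity with the cumulative capacity before it (prefix sums)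
def edThresholds : List Int → Int → List (Int × Int)
  | [], _ => []
  | c :: rest, prev => (c, prev) :: edThresholds rest (prev + c)

-- B's loop: compare the fixed input against each threshold, break at the first one not exceeded
def edLoopB : List (Int × Int) → Int → List Int
  | [], _ => []
  | (c, p) :: rest, n =>
      if n ≤ p then [] else min c (n - p) :: edLoopB rest n

def calculate_electron_distribution_alt (num_electrons : Int) : List Int :=
  edLoopB (edThresholds ELECTRON_DISTRIBUTION 0) num_electrons

-- ===== PRECONDITION & SPEC =====
def Spec_calculate_electron_distribution (num_electrons : Int) (out : List Int) : Prop := out = calculate_electron_distribution_alt num_electrons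
instance (num_electrons : Int) (out : List Int) : Decidable (Spec_calculate_electron_distribution num_electrons out) := by unfold Spec_calculate_electron_distribution; infer_instance

-- ===== CLAIM (what is proved, stated in full; the proofs are below) =====
def Claim_equal_calculate_electron_distribution : Prop := ∀ (num_electrons : Int), Dom_calculate_electron_distribution num_electrons → Spec_calculate_electron_distribution num_electrons (calculate_electron_distribution num_electrons)

-- ===== LEMMAS AND PROOFS =====
theorem edLoopA_nonpos (caps : List Int) (m : Int) (h : m ≤ 0) : edLoopA caps m = [] := by
  cases caps with
  | nil => rfl
  | cons c rest => simp [edLoopA]; omega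

theorem edLoop_agree (caps : List Int) (prev n : Int) (hpos : ∀ x ∈ caps, 0 < x) :
    edLoopA caps (n - prev) = edLoopB (edThresholds caps prev) n := by
  induction caps generalizing prev with
  | nil => rfl
  | cons c rest ih =>
    have hc : 0 < c := hpos c (by simp)
    have hrest : ∀ x ∈ rest, 0 < x := fun x hx => hpos x (by simp [hx])
    simp only [edThresholds, edLoopA, edLoopB]
    by_cases hle : n ≤ prev
    · simp [hle]
    · rw [if_pos (show n - prev > 0 by omega), if_neg hle]
      refine List.cons_eq_cons.mpr ⟨by omega, ?_⟩
      · by_cases hcap : c ≤ n - prev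
        · have : n - prev - min (n - prev) c = n - (prev + c) := by omega
          rw [this, ih (prev + c) hrest]
        · have h1 : n - prev - min (n - prev) c = 0 := by omega
          rw [h1, edLoopA_nonpos rest 0 le_rfl,
              ← ih (prev + c) hrest, edLoopA_nonpos rest (n - (prev + c)) (by omega)]

-- ===== VERDICT (by name: the statement is the Claim_ definition above) =====
theorem calculate_electron_distribution_spec : Claim_equal_calculate_electron_distribution := by
  intro n _
  unfold Spec_calculate_electron_distribution calculate_electron_distribution calculate_electron_distribution_alt
  have := edLoop_agree ELECTRON_DISTRIBUTION 0 n (by decide)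
  simpa using this
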